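-- pv_equiv track=rewrite | github.com/Arshia-Joshi/DDR | src/sample_ext.py | structure_inspection_data
-- ===== SOURCE A (Python) =====
-- def structure_inspection_data(flat_data):
--
--     structured = {
--         "property_details": {},
--         "leakage_details": {},
--         "bathroom_observations": {},
--         "external_wall_observations": {},
--         "other_observations": {}
--     }
--
--     for key, value in flat_data.items():
--
--         lower_key = key.lower()
--
--
--         if any(word in lower_key for word in [
--             "property",
--             "floors",
--             "inspection date",
--             "inspected by",
--             "customer",
--             "mobile",
--             "email",
--             "address"
--         ]):
--             structured["property_details"][key] = value
--
--
--         elif "leakage" in lower_key: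
--             structured["leakage_details"][key] = value
--
--
--         elif any(word in lower_key for word in [
--             "tile",
--             "nahani",
--             "wc",
--             "gaps",
--             "plumbing",
--             "flush",
--             "washbasin"
--         ]):
--             structured["bathroom_observations"][key] = value
--
--
--         elif any(word in lower_key for word in [
--             "external wall",
--             "paint",
--             "crack",
--             "rcc",
--             "column",
--             "beam",
--             "corrosion"
--         ]):
--             structured["external_wall_observations"][key] = value
--
--
--         else:
--             structured["other_observations"][key] = value
--
--     return structured
-- ===== SOURCE B (Python) =====
-- _SECTIONS = (
--     ("property_details", ("property", "floors", "inspection date", "inspected by",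
--                           "customer", "mobile", "email", "address")),
--     ("leakage_details", ("leakage",)),
--     ("bathroom_observations", ("tile", "nahani", "wc", "gaps", "plumbing", "flush", "washbasin")),
--     ("external_wall_observations", ("external wall", "paint", "crack", "rcc", "column", "beam", "corrosion")),
-- )
--
--
-- def _section(key):
--     lower_key = key.lower()
--     for name, words in _SECTIONS:
--         if any(word in lower_key for word in words):
--             return name
--     return "other_observations"
--
--
-- def structure_inspection_data(flat_data):
--     names = [name for name, _ in _SECTIONS] + ["other_observations"]
--     return {name: {k: v for k, v in flat_data.items() if _section(k) == name}
--             for name in names}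
-- ===== Notes on version B (the rewrite author's own statement) =====
-- stated objective: simpler
-- what changed: Replaces the hard-coded five-branch if/elif cascade with a data-driven (section, keywords) table and a single classifier function; the output is built per section by filtering the items, instead of inserting item by item into mutable section dicts.
import Mathlib
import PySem

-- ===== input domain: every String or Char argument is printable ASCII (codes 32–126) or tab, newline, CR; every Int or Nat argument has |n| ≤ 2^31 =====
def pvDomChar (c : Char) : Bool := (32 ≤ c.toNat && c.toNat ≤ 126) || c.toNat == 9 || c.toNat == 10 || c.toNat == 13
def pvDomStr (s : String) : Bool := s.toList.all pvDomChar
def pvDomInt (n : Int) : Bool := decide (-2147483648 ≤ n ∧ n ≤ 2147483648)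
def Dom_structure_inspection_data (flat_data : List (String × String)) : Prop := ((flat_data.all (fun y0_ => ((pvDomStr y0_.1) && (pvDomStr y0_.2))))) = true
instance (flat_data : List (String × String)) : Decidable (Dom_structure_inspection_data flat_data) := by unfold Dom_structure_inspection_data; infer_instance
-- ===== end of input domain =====

-- B replaces A's hard-coded if/elif cascade with a data-driven (section, keywords) table
-- and a single classifier; the output is built per section by filtering (objective: simpler).

-- ===== PORT A =====
def siPropWords : List String :=
  ["property", "floors", "inspection date", "inspected by", "customer", "mobile", "email", "address"]
def siBathWords : List String :=
  ["tile", "nahani", "wc", "gaps", "plumbing", "flush", "washbasin"]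
def siWallWords : List String :=
  ["external wall", "paint", "crack", "rcc", "column", "beam", "corrosion"]

structure SIState where
  prop : PySem.Dict String String
  leak : PySem.Dict String String
  bath : PySem.Dict String String
  wall : PySem.Dict String String
  other : PySem.Dict String String

-- one iteration of A's for-loop (the if/elif cascade, in A's branch order)
def siStep (st : SIState) (p : String × String) : SIState :=
  if siPropWords.any (fun w => PySem.Str.isIn w (PySem.Str.lower p.1)) then
    { st with prop := st.prop.insert p.1 p.2 }
  else if PySem.Str.isIn "leakage" (PySem.Str.lower p.1) then
    { st with leak := st.leak.insert p.1 p.2 }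
  else if siBathWords.any (fun w => PySem.Str.isIn w (PySem.Str.lower p.1)) then
    { st with bath := st.bath.insert p.1 p.2 }
  else if siWallWords.any (fun w => PySem.Str.isIn w (PySem.Str.lower p.1)) then
    { st with wall := st.wall.insert p.1 p.2 }
  else
    { st with other := st.other.insert p.1 p.2 }

-- A receives a Python dict; the association list is read through PySem.Dict.ofList (= dict(flat_data)).
def structure_inspection_data (flat_data : List (String × String)) : List (String × List (String × String)) :=
  let st := ((PySem.Dict.ofList flat_data).items).foldl siStep
    ⟨PySem.Dict.empty, PySem.Dict.empty, PySem.Dict.empty, PySem.Dict.empty, PySem.Dict.empty⟩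
  [("property_details", st.prop.items),
   ("leakage_details", st.leak.items),
   ("bathroom_observations", st.bath.items),
   ("external_wall_observations", st.wall.items),
   ("other_observations", st.other.items)]

-- ===== PORT B =====
def siSections : List (String × List String) :=
  [("property_details",
    ["property", "floors", "inspection date", "inspected by", "customer", "mobile", "email", "address"]),
   ("leakage_details", ["leakage"]),
   ("bathroom_observations", ["tile", "nahani", "wc", "gaps", "plumbing", "flush", "washbasin"]),
   ("external_wall_observations", ["external wall", "paint", "crack", "rcc", "column", "beam", "corrosion"])]

-- Source B's for-loop over the table with early return
def siScan (lk : String) : List (String × List String) → String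
  | [] => "other_observations"
  | (name, words) :: rest =>
    if words.any (fun w => PySem.Str.isIn w lk) then name else siScan lk rest

def siSection (key : String) : String :=
  siScan (PySem.Str.lower key) siSections

-- the inner dict comprehension ranges over dict items (distinct keys), hence is a filter
def structure_inspection_data_alt (flat_data : List (String × String)) : List (String × List (String × String)) :=
  (siSections.map Prod.fst ++ ["other_observations"]).map
    (fun name => (name, ((PySem.Dict.ofList flat_data).items).filter (fun p => siSection p.1 == name)))

-- ===== PRECONDITION & SPEC =====
def Spec_structure_inspection_data (flat_data : List (String × String)) (out : List (String × List (String × String))) : Prop := out = structure_inspection_data_alt flat_data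
instance (flat_data : List (String × String)) (out : List (String × List (String × String))) : Decidable (Spec_structure_inspection_data flat_data out) := by unfold Spec_structure_inspection_data; infer_instance

-- ===== CLAIM (what is proved, stated in full; the proofs are below) =====
def Claim_equal_structure_inspection_data : Prop := ∀ (flat_data : List (String × String)), Dom_structure_inspection_data flat_data → Spec_structure_inspection_data flat_data (structure_inspection_data flat_data)

-- ===== LEMMAS AND PROOFS =====

lemma siSection_eq (key : String) :
    siSection key =
      if siPropWords.any (fun w => PySem.Str.isIn w (PySem.Str.lower key)) then "property_details"
      else if PySem.Str.isIn "leakage" (PySem.Str.lower key) then "leakage_details"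
      else if siBathWords.any (fun w => PySem.Str.isIn w (PySem.Str.lower key)) then "bathroom_observations"
      else if siWallWords.any (fun w => PySem.Str.isIn w (PySem.Str.lower key)) then "external_wall_observations"
      else "other_observations" := by
  simp [siSection, siScan, siSections, siPropWords, siBathWords, siWallWords]

lemma fold_eq (l : List (String × String)) (st : SIState)
    (hnd : (l.map Prod.fst).Nodup)
    (h : ∀ q ∈ l, st.prop.contains q.1 = false ∧ st.leak.contains q.1 = false ∧
         st.bath.contains q.1 = false ∧ st.wall.contains q.1 = false ∧ st.other.contains q.1 = false) :
    l.foldl siStep st =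
      ⟨⟨st.prop.items ++ l.filter (fun p => siSection p.1 == "property_details")⟩,
       ⟨st.leak.items ++ l.filter (fun p => siSection p.1 == "leakage_details")⟩,
       ⟨st.bath.items ++ l.filter (fun p => siSection p.1 == "bathroom_observations")⟩,
       ⟨st.wall.items ++ l.filter (fun p => siSection p.1 == "external_wall_observations")⟩,
       ⟨st.other.items ++ l.filter (fun p => siSection p.1 == "other_observations")⟩⟩ := by
  induction l generalizing st with
  | nil => simp
  | cons p rest ih =>
    obtain ⟨hp1, hp2, hp3, hp4, hp5⟩ := h p (List.mem_cons_self ..)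
    simp only [List.map_cons, List.nodup_cons] at hnd
    obtain ⟨hpnotin, hnd'⟩ := hnd
    have hne : ∀ q ∈ rest, (q.1 == p.1) = false := by
      intro q hq
      simp only [beq_eq_false_iff_ne, ne_eq]
      intro e
      exact hpnotin (e ▸ List.mem_map_of_mem hq)
    have hrest : ∀ (d : PySem.Dict String String), d.contains p.1 = false →
        ∀ q ∈ rest, (d.insert p.1 p.2).contains q.1 = d.contains q.1 := by
      intro d _ q hq
      rw [PySem.Dict.contains_insert]
      simp [hne q hq]
    rw [List.foldl_cons]
    by_cases h1 : siPropWords.any (fun w => PySem.Str.isIn w (PySem.Str.lower p.1)) = true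
    · have hsec : siSection p.1 = "property_details" := by rw [siSection_eq, if_pos h1]
      have hstep : siStep st p = { st with prop := st.prop.insert p.1 p.2 } := by
        simp only [siStep]; rw [if_pos h1]
      rw [hstep, ih _ hnd' ?_]
      · simp [PySem.Dict.items_insert_of_not_contains _ _ hp1, hsec]
      · intro q hq
        obtain ⟨hq1, hq2, hq3, hq4, hq5⟩ := h q (List.mem_cons_of_mem _ hq)
        exact ⟨by rw [hrest _ hp1 q hq]; exact hq1, hq2, hq3, hq4, hq5⟩
    · rw [Bool.not_eq_true] at h1
      by_cases h2 : PySem.Str.isIn "leakage" (PySem.Str.lower p.1) = true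
      · have hsec : siSection p.1 = "leakage_details" := by
          rw [siSection_eq, if_neg (ne_true_of_eq_false h1), if_pos h2]
        have hstep : siStep st p = { st with leak := st.leak.insert p.1 p.2 } := by
          simp only [siStep]; rw [if_neg (ne_true_of_eq_false h1), if_pos h2]
        rw [hstep, ih _ hnd' ?_]
        · simp [PySem.Dict.items_insert_of_not_contains _ _ hp2, hsec]
        · intro q hq
          obtain ⟨hq1, hq2, hq3, hq4, hq5⟩ := h q (List.mem_cons_of_mem _ hq)
          exact ⟨hq1, by rw [hrest _ hp2 q hq]; exact hq2, hq3, hq4, hq5⟩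
      · rw [Bool.not_eq_true] at h2
        by_cases h3 : siBathWords.any (fun w => PySem.Str.isIn w (PySem.Str.lower p.1)) = true
        · have hsec : siSection p.1 = "bathroom_observations" := by
            rw [siSection_eq, if_neg (ne_true_of_eq_false h1), if_neg (ne_true_of_eq_false h2), if_pos h3]
          have hstep : siStep st p = { st with bath := st.bath.insert p.1 p.2 } := by
            simp only [siStep]; rw [if_neg (ne_true_of_eq_false h1), if_neg (ne_true_of_eq_false h2), if_pos h3]
          rw [hstep, ih _ hnd' ?_]
          · simp [PySem.Dict.items_insert_of_not_contains _ _ hp3, hsec]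
          · intro q hq
            obtain ⟨hq1, hq2, hq3, hq4, hq5⟩ := h q (List.mem_cons_of_mem _ hq)
            exact ⟨hq1, hq2, by rw [hrest _ hp3 q hq]; exact hq3, hq4, hq5⟩
        · rw [Bool.not_eq_true] at h3
          by_cases h4 : siWallWords.any (fun w => PySem.Str.isIn w (PySem.Str.lower p.1)) = true
          · have hsec : siSection p.1 = "external_wall_observations" := by
              rw [siSection_eq, if_neg (ne_true_of_eq_false h1), if_neg (ne_true_of_eq_false h2), if_neg (ne_true_of_eq_false h3),
                if_pos h4]
            have hstep : siStep st p = { st with wall := st.wall.insert p.1 p.2 } := by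
              simp only [siStep]
              rw [if_neg (ne_true_of_eq_false h1), if_neg (ne_true_of_eq_false h2), if_neg (ne_true_of_eq_false h3), if_pos h4]
            rw [hstep, ih _ hnd' ?_]
            · simp [PySem.Dict.items_insert_of_not_contains _ _ hp4, hsec]
            · intro q hq
              obtain ⟨hq1, hq2, hq3, hq4, hq5⟩ := h q (List.mem_cons_of_mem _ hq)
              exact ⟨hq1, hq2, hq3, by rw [hrest _ hp4 q hq]; exact hq4, hq5⟩
          · rw [Bool.not_eq_true] at h4
            have hsec : siSection p.1 = "other_observations" := by
              rw [siSection_eq, if_neg (ne_true_of_eq_false h1), if_neg (ne_true_of_eq_false h2), if_neg (ne_true_of_eq_false h3),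
                if_neg (ne_true_of_eq_false h4)]
            have hstep : siStep st p = { st with other := st.other.insert p.1 p.2 } := by
              simp only [siStep]
              rw [if_neg (ne_true_of_eq_false h1), if_neg (ne_true_of_eq_false h2), if_neg (ne_true_of_eq_false h3),
                if_neg (ne_true_of_eq_false h4)]
            rw [hstep, ih _ hnd' ?_]
            · simp [PySem.Dict.items_insert_of_not_contains _ _ hp5, hsec]
            · intro q hq
              obtain ⟨hq1, hq2, hq3, hq4, hq5⟩ := h q (List.mem_cons_of_mem _ hq)
              exact ⟨hq1, hq2, hq3, hq4, by rw [hrest _ hp5 q hq]; exact hq5⟩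

-- ===== VERDICT (by name: the statement is the Claim_ definition above) =====
theorem structure_inspection_data_spec : Claim_equal_structure_inspection_data := by
  intro flat_data _
  unfold Spec_structure_inspection_data structure_inspection_data structure_inspection_data_alt
  rw [fold_eq]
  · simp [siSections, PySem.Dict.empty]
  · exact PySem.Dict.nodup_keys_ofList flat_data
  · intro q _
    simp [PySem.Dict.contains_empty]
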